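-- pv_equiv track=rewrite | github.com/Abbea2007/PythonSemana3 | test9.py | eliminar_con_vocal
-- ===== SOURCE A (Python) =====
-- def eliminar_con_vocal(caden, vowels, consonents):
--     for string in caden:
--         if len(string) % 2 == 1:  # Si la longitud es impar, eliminar vocales
--             for vocals in vowels:
--                 string = string.replace(vocals, "")
--             return string  # Retorna después de eliminar todas las vocales
--         elif len(string) % 2 == 0:  # Si la longitud es par, eliminar consonantes
--             for conson in consonents:
--                 string = string.replace(conson, "")
--             return string  # Retorna después de eliminar todas las consonantes
-- ===== SOURCE B (Python) =====
-- def eliminar_con_vocal(caden, vowels, consonents):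
--     for string in caden:
--         banned = set(vowels) if len(string) % 2 == 1 else set(consonents)
--         return "".join(ch for ch in string if ch not in banned)
-- ===== Notes on version B (the rewrite author's own statement) =====
-- stated objective: simpler
-- what changed: The inner loop that repeatedly rebuilds the whole string with .replace for each banned element is replaced by one membership-filtered pass over the characters of the first string (banned alphabet chosen once by parity); Pre_ excludes inputs whose selected alphabet contains a multi-character string built only from the first string's characters, where substring .replace and per-character membership are two defensible readings of 'remove these letters'.
-- outside the precondition, e.g. on eliminar_con_vocal(['abc'], ['ab'], []): A returns 'c', B returns 'abc'
import Mathlib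
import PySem

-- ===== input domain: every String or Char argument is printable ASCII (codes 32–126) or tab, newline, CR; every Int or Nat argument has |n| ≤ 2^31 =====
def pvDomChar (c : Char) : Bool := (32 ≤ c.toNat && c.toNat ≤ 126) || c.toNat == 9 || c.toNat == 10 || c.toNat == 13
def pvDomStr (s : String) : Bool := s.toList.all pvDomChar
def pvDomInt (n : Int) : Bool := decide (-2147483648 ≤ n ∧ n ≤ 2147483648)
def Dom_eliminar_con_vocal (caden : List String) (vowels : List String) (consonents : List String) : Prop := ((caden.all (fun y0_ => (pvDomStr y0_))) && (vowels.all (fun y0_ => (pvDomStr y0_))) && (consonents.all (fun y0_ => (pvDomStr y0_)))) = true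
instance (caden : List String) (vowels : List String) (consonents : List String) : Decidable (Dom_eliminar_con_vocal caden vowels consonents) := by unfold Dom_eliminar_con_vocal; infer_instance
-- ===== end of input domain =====

-- B replaces A's repeated whole-string .replace per banned element with a single
-- membership-filtered pass over the characters of the first string (objective: simpler).


-- ===== PORT A =====
def eliminar_con_vocal (caden : List String) (vowels : List String) (consonents : List String) : Option String :=
  match caden with
  | [] => none
  | string :: rest =>
    if PySem.Int.mod (PySem.Str.len string) 2 == 1 then
      some (vowels.foldl (fun st vocals => PySem.Str.replace st vocals "") string)
    else if PySem.Int.mod (PySem.Str.len string) 2 == 0 then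
      some (consonents.foldl (fun st conson => PySem.Str.replace st conson "") string)
    else
      eliminar_con_vocal rest vowels consonents

-- ===== PORT B =====
def eliminar_con_vocal_alt (caden : List String) (vowels : List String) (consonents : List String) : Option String :=
  match caden with
  | [] => none
  | string :: _ =>
    let banned : PySem.Set String :=
      if PySem.Int.mod (PySem.Str.len string) 2 == 1 then PySem.Set.ofList vowels
      else PySem.Set.ofList consonents
    -- "".join(ch for ch in string if ch not in banned)
    some (PySem.Str.join ""
      ((string.toList.filter (fun ch => !(PySem.Set.contains banned (String.ofList [ch])))).map
        (fun ch => String.ofList [ch])))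

-- ===== PRECONDITION & SPEC =====
-- Pre_ excludes inputs whose selected alphabet (vowels if the first string's length is odd,
-- consonents if it is even) contains a multi-character string built only from the first
-- string's characters: there substring .replace can delete substrings while per-character
-- membership cannot, and both are defensible readings of "remove these letters".
def Pre_eliminar_con_vocal (caden : List String) (vowels : List String) (consonents : List String) : Prop :=
  ∀ s ∈ caden.take 1,
    ∀ t ∈ (if s.toList.length % 2 = 1 then vowels else consonents),
      t.toList.length ≤ 1 ∨ ∃ c ∈ t.toList, c ∉ s.toList
instance (caden : List String) (vowels : List String) (consonents : List String) : Decidable (Pre_eliminar_con_vocal caden vowels consonents) := by unfold Pre_eliminar_con_vocal; infer_instance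

def pvWitness_eliminar_con_vocal : List String × List String × List String :=
  (["abc"], ["a", "e"], ["b", "c"])

def Spec_eliminar_con_vocal (caden : List String) (vowels : List String) (consonents : List String) (out : Option String) : Prop := out = eliminar_con_vocal_alt caden vowels consonents
instance (caden : List String) (vowels : List String) (consonents : List String) (out : Option String) : Decidable (Spec_eliminar_con_vocal caden vowels consonents out) := by unfold Spec_eliminar_con_vocal; infer_instance

-- ===== CLAIM (what is proved, stated in full; the proofs are below) =====
def Claim_equal_eliminar_con_vocal : Prop := ∀ (caden : List String) (vowels : List String) (consonents : List String), Dom_eliminar_con_vocal caden vowels consonents → Pre_eliminar_con_vocal caden vowels consonents → Spec_eliminar_con_vocal caden vowels consonents (eliminar_con_vocal caden vowels consonents)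

-- ===== LEMMAS AND PROOFS =====

-- The fueled replace loop with a single-character pattern and empty replacement is a filter.
theorem pv_replace_go_filter (v : Char) :
    ∀ (l acc : List Char) (fuel : Nat), l.length ≤ fuel →
      PySem.Chars.replace.go [v] [] fuel l acc = acc.reverse ++ l.filter (fun c => c != v) := by
  intro l
  induction l with
  | nil =>
    intro acc fuel _
    cases fuel <;> simp [PySem.Chars.replace.go]
  | cons c t ih =>
    intro acc fuel hf
    cases fuel with
    | zero => simp at hf
    | succ f =>
      have hft : t.length ≤ f := by simp at hf; omega
      rw [PySem.Chars.replace.go.eq_def]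
      by_cases hcv : c = v
      · subst hcv
        simp [List.isPrefixOf, ih acc f hft]
      · simp [List.isPrefixOf, Ne.symm hcv, ih (c :: acc) f hft, hcv]

theorem pv_replace_single (s t : String) (v : Char) (ht : t.toList = [v]) :
    PySem.Str.replace s t "" = String.ofList (s.toList.filter (fun c => c != v)) := by
  simp [PySem.Str.replace, ht, PySem.Chars.replace]
  rw [pv_replace_go_filter v s.toList [] s.length (le_of_eq (by simp))]
  simp

-- A pattern containing a character absent from the scanned list never matches.
theorem pv_replace_go_nomatch (old new : List Char) (c : Char) (hc : c ∈ old) :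
    ∀ (l acc : List Char) (fuel : Nat), c ∉ l →
      PySem.Chars.replace.go old new fuel l acc = acc.reverse ++ l := by
  intro l
  induction l with
  | nil =>
    intro acc fuel _
    cases fuel <;> simp [PySem.Chars.replace.go]
  | cons a t ih =>
    intro acc fuel hnl
    cases fuel with
    | zero => rw [PySem.Chars.replace.go.eq_def]
    | succ f =>
      have hpre : old.isPrefixOf (a :: t) = false := by
        rw [Bool.eq_false_iff]
        intro hp
        exact hnl ((List.isPrefixOf_iff_prefix.mp hp).subset hc)
      rw [PySem.Chars.replace.go.eq_def]
      simp only [hpre, Bool.false_eq_true, if_false]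
      rw [ih (a :: acc) f (fun hm => hnl (List.mem_cons_of_mem _ hm))]
      simp

theorem pv_replace_nomatch (s t : String) (c : Char) (hc : c ∈ t.toList) (hcs : c ∉ s.toList) :
    PySem.Str.replace s t "" = s := by
  have hne : t.toList.isEmpty = false := by
    cases h : t.toList with
    | nil => rw [h] at hc; simp at hc
    | cons a l => rfl
  simp [PySem.Str.replace, PySem.Chars.replace, hne]
  rw [pv_replace_go_nomatch t.toList [] c hc s.toList [] s.length hcs]
  simp

theorem pv_replace_emptyPat (s t : String) (ht : t.toList = []) :
    PySem.Str.replace s t "" = s := by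
  simp [PySem.Str.replace, PySem.Chars.replace, ht]

theorem pv_foldl_replace (s0 : List Char) (banned : List String)
    (h : ∀ t ∈ banned, t.toList.length ≤ 1 ∨ ∃ c ∈ t.toList, c ∉ s0) :
    ∀ (s : String), (∀ c ∈ s.toList, c ∈ s0) →
      banned.foldl (fun st t => PySem.Str.replace st t "") s
        = String.ofList (s.toList.filter (fun ch => !(banned.contains (String.ofList [ch])))) := by
  induction banned with
  | nil => intro s _; simp
  | cons t ts ih =>
    intro s hsub
    have hts : ∀ x ∈ ts, x.toList.length ≤ 1 ∨ ∃ c ∈ x.toList, c ∉ s0 :=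
      fun x hx => h x (List.mem_cons_of_mem _ hx)
    simp only [List.foldl_cons]
    rcases h t (by simp) with hlen | ⟨c, hc, hcs⟩
    · cases hl : t.toList with
      | nil =>
        rw [pv_replace_emptyPat s t hl, ih hts s hsub]
        congr 1
        apply List.filter_congr
        intro ch _
        have hne : ¬ (String.ofList [ch] = t) := fun he => by
          have := congrArg String.toList he
          rw [hl] at this
          simp at this
        simp [hne]
      | cons v l =>
        have hv : t.toList = [v] := by
          rw [hl] at hlen
          cases l with
          | nil => exact hl
          | cons b l' => simp at hlen
        rw [pv_replace_single s t v hv]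
        rw [ih hts (String.ofList (s.toList.filter (fun c => c != v)))
          (fun c hm => by
            rw [String.toList_ofList] at hm
            exact hsub c (List.mem_of_mem_filter hm))]
        rw [String.toList_ofList, List.filter_filter]
        congr 1
        apply List.filter_congr
        intro ch _
        by_cases hchv : ch = v
        · have heq : String.ofList [v] = t := by rw [← hv, String.ofList_toList]
          simp [hchv, heq]
        · have hne : ¬ (String.ofList [ch] = t) :=
            fun he => hchv (by simpa [hv] using congrArg String.toList he)
          simp [hchv, hne]
    · rw [pv_replace_nomatch s t c hc (fun hm => hcs (hsub c hm)), ih hts s hsub]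
      congr 1
      apply List.filter_congr
      intro ch hch
      have hne : ¬ (String.ofList [ch] = t) := fun he => by
        have hts' := congrArg String.toList he
        simp at hts'
        rw [← hts'] at hc
        simp at hc
        exact hcs (by rw [hc]; exact hsub ch hch)
      simp [hne]

theorem pv_alt_branch (s : String) (banned : List String)
    (h : ∀ t ∈ banned, t.toList.length ≤ 1 ∨ ∃ c ∈ t.toList, c ∉ s.toList) :
    PySem.Str.join ""
        ((s.toList.filter (fun ch => !(PySem.Set.contains (PySem.Set.ofList banned) (String.ofList [ch])))).map
          (fun ch => String.ofList [ch]))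
      = banned.foldl (fun st t => PySem.Str.replace st t "") s := by
  rw [pv_foldl_replace s.toList banned h s (fun _ hm => hm)]
  have hnil : "".toList = ([] : List Char) := rfl
  simp only [PySem.Str.join, List.map_map, Function.comp_def, String.toList_ofList, hnil]
  rw [PySem.Chars.join_nil_singletons]
  congr 1
  apply List.filter_congr
  intro ch _
  simp [PySem.Set.contains_eq_listContains, PySem.Set.mem_ofList]

theorem pv_mod_two (s : String) :
    PySem.Int.mod (PySem.Str.len s) 2 = ((s.toList.length % 2 : Nat) : Int) := by
  simp [PySem.Str.len_eq, PySem.Int.mod, Int.fmod_eq_emod]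

-- ===== VERDICT (by name: the statement is the Claim_ definition above) =====
theorem eliminar_con_vocal_spec : Claim_equal_eliminar_con_vocal := by
  intro caden vowels consonents _ hpre
  unfold Spec_eliminar_con_vocal
  cases caden with
  | nil => rfl
  | cons s rest =>
    have hsel := hpre s (by simp)
    by_cases hodd : s.toList.length % 2 = 1
    · rw [if_pos hodd] at hsel
      have hcond : (PySem.Int.mod (PySem.Str.len s) 2 == 1) = true := by
        rw [pv_mod_two, hodd]; decide
      simp only [eliminar_con_vocal, eliminar_con_vocal_alt, hcond, if_true]
      exact congrArg some (pv_alt_branch s vowels hsel).symm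
    · have heven : s.toList.length % 2 = 0 := by omega
      rw [if_neg hodd] at hsel
      have hcond1 : (PySem.Int.mod (PySem.Str.len s) 2 == 1) = false := by
        rw [pv_mod_two, heven]; decide
      have hcond2 : (PySem.Int.mod (PySem.Str.len s) 2 == 0) = true := by
        rw [pv_mod_two, heven]; decide
      simp only [eliminar_con_vocal, eliminar_con_vocal_alt, hcond1, hcond2,
        Bool.false_eq_true, if_false, if_true]
      exact congrArg some (pv_alt_branch s consonents hsel).symm
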